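-- pv_equiv track=rewrite | github.com/Ali-Nasir2/pdf-ligature-stego-sniffer | core/analyzer.py | summarize_font_characters
-- ===== SOURCE A (Python) =====
-- from typing import List, Dict, Any
--
-- def summarize_font_characters(records: List[Dict[str, Any]]) -> Dict[str, Dict[str, int]]:
--     """Returns {fontname: {char: count}} mapping."""
--     font_char_counts = {}
--     for r in records:
--         font = r["fontname"]
--         char = r["char"]
--         if font not in font_char_counts:
--             font_char_counts[font] = {}
--         font_char_counts[font][char] = font_char_counts[font].get(char, 0) + 1
--     return font_char_counts
-- ===== SOURCE B (Python) =====
-- def summarize_font_characters(records):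
--     """Returns {fontname: {char: count}} mapping."""
--     # pass 1: partition the chars by font
--     groups = {}
--     for r in records:
--         groups.setdefault(r["fontname"], []).append(r["char"])
--     # pass 2: count each font's char list
--     return {font: {c: chars.count(c) for c in dict.fromkeys(chars)}
--             for font, chars in groups.items()}
-- ===== Notes on version B (the rewrite author's own statement) =====
-- stated objective: alternative
-- what changed: Replaces the single-pass nested-dict incremental counting with a partition-then-count strategy: one pass groups chars into per-font lists via setdefault/append, a second pass turns each list into its count dict (ordered dedup + count).
import Mathlib
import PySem

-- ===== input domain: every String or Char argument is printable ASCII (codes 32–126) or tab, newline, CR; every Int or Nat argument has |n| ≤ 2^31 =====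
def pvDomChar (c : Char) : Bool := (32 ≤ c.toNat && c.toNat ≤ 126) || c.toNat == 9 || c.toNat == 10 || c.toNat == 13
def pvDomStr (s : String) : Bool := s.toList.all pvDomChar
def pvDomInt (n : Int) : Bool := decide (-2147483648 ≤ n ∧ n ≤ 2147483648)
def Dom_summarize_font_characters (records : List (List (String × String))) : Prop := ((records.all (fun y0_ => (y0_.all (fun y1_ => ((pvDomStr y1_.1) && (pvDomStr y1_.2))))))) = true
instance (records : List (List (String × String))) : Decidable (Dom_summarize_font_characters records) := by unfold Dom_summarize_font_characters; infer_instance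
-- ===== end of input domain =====

-- B re-implements A by a partition-then-count strategy (group chars per font, then count each list); same result, alternative structure.

-- ===== PORT A =====
-- one loop step of A: look up both keys (none = KeyError, excluded by Pre_), ensure the font's
-- inner dict exists, then bump the char's count in it
def pvStepA (acc : PySem.Dict String (PySem.Dict String Int)) (r : List (String × String)) :
    PySem.Dict String (PySem.Dict String Int) :=
  match (PySem.Dict.mk r).get? "fontname", (PySem.Dict.mk r).get? "char" with
  | some font, some ch =>
      let acc2 := if acc.contains font then acc else acc.insert font (PySem.Dict.mk [])
      acc2.insert font ((acc2.getD font (PySem.Dict.mk [])).insert ch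
        ((acc2.getD font (PySem.Dict.mk [])).getD ch 0 + 1))
  | _, _ => acc  -- unreachable under Pre_ (Python raises KeyError)

def summarize_font_characters (records : List (List (String × String))) : List (String × List (String × Int)) :=
  ((records.foldl pvStepA (PySem.Dict.mk [])).items).map (fun p => (p.1, p.2.items))

-- ===== PORT B =====
-- pass 1: groups.setdefault(r["fontname"], []).append(r["char"])
def pvStepB (g : PySem.Dict String (List String)) (r : List (String × String)) :
    PySem.Dict String (List String) :=
  match (PySem.Dict.mk r).get? "fontname", (PySem.Dict.mk r).get? "char" with
  | some font, some ch => g.modify font [] (· ++ [ch])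
  | _, _ => g  -- unreachable under Pre_

def summarize_font_characters_alt (records : List (List (String × String))) : List (String × List (String × Int)) :=
  let groups := records.foldl pvStepB (PySem.Dict.mk [])
  -- pass 2: {font: {c: chars.count(c) for c in dict.fromkeys(chars)} for font, chars in groups.items()}
  groups.items.map (fun p => (p.1, (PySem.List.dedup p.2).map (fun c => (c, (p.2.count c : Int)))))

-- ===== PRECONDITION & SPEC =====
-- Pre_ excludes exactly the records missing the "fontname" or "char" key, on which Python A raises KeyError.
def Pre_summarize_font_characters (records : List (List (String × String))) : Prop :=
  ∀ r ∈ records, (PySem.Dict.mk r).contains "fontname" = true ∧ (PySem.Dict.mk r).contains "char" = true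
instance (records : List (List (String × String))) : Decidable (Pre_summarize_font_characters records) := by
  unfold Pre_summarize_font_characters; infer_instance
def pvWitness_summarize_font_characters : (List (List (String × String))) :=
  [[("fontname", "F1"), ("char", "a")], [("fontname", "F1"), ("char", "a")], [("fontname", "F2"), ("char", "b")]]

def Spec_summarize_font_characters (records : List (List (String × String))) (out : List (String × List (String × Int))) : Prop := out = summarize_font_characters_alt records
instance (records : List (List (String × String))) (out : List (String × List (String × Int))) : Decidable (Spec_summarize_font_characters records out) := by unfold Spec_summarize_font_characters; infer_instance

-- ===== CLAIM (what is proved, stated in full; the proofs are below) =====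
def Claim_equal_summarize_font_characters : Prop := ∀ (records : List (List (String × String))), Dom_summarize_font_characters records → Pre_summarize_font_characters records → Spec_summarize_font_characters records (summarize_font_characters records)

-- ===== LEMMAS AND PROOFS =====

-- A's nested dict is B's grouping dict with each char list replaced by its counter
def pvMapC (g : PySem.Dict String (List String)) : PySem.Dict String (PySem.Dict String Int) :=
  PySem.Dict.mk (g.items.map (fun p => (p.1, PySem.Dict.counter p.2)))

lemma pvMapC_get? (g : PySem.Dict String (List String)) (k : String) :
    (pvMapC g).get? k = (g.get? k).map PySem.Dict.counter := by
  obtain ⟨l⟩ := g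
  simp only [pvMapC, PySem.Dict.get?, List.find?_map]
  have hp : ((fun p : String × PySem.Dict String Int => p.1 == k) ∘
      (fun p : String × List String => (p.1, PySem.Dict.counter p.2))) =
      (fun p : String × List String => p.1 == k) := rfl
  rw [hp]
  cases l.find? (fun p => p.1 == k) <;> rfl

lemma pvMapC_contains (g : PySem.Dict String (List String)) (k : String) :
    (pvMapC g).contains k = g.contains k := by
  rw [PySem.Dict.contains_eq_isSome_get?, PySem.Dict.contains_eq_isSome_get?, pvMapC_get?]
  cases g.get? k <;> rfl

lemma pvMapC_insert (g : PySem.Dict String (List String)) (k : String) (v : List String) :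
    pvMapC (g.insert k v) = (pvMapC g).insert k (PySem.Dict.counter v) := by
  simp only [PySem.Dict.insert, pvMapC_contains]
  split
  · simp only [pvMapC, List.map_map]
    congr 1
    apply List.map_congr_left
    intro p _
    by_cases h : p.1 == k <;> simp_all
  · simp [pvMapC]

lemma pvInsert_insert_self (d : PySem.Dict String (PySem.Dict String Int)) (k : String)
    (v w : PySem.Dict String Int) : (d.insert k v).insert k w = d.insert k w := by
  obtain ⟨l⟩ := d
  by_cases h : (PySem.Dict.mk l).contains k
  · have h2 : ((PySem.Dict.mk l).insert k v).contains k = true :=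
      PySem.Dict.contains_insert_self _ _ _
    simp only [PySem.Dict.insert, h, if_pos] at h2 ⊢
    simp only [h2, if_pos]
    congr 1
    simp only [List.map_map]
    apply List.map_congr_left
    intro p _
    by_cases hp : p.1 == k <;> simp_all
  · have h2 : ((PySem.Dict.mk l).insert k v).contains k = true :=
      PySem.Dict.contains_insert_self _ _ _
    simp only [PySem.Dict.insert, h, if_false, Bool.false_eq_true] at h2 ⊢
    simp only [h2, if_pos]
    congr 1
    simp only [PySem.Dict.contains_mk, List.any_eq_true, not_exists] at h
    simp only [List.map_append, List.map_cons, List.map_nil, BEq.rfl, if_pos, List.append_cancel_right_eq]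
    · have : ∀ p ∈ l, (fun p => if (p.1 == k) = true then (k, w) else p) p = p := by
        intro p hp
        have := h p
        simp_all
      rw [List.map_congr_left this, List.map_id']

-- A's step on the mapped dict is the map of B's step
lemma pvStep_comm (g : PySem.Dict String (List String)) (r : List (String × String)) :
    pvStepA (pvMapC g) r = pvMapC (pvStepB g r) := by
  unfold pvStepA pvStepB
  cases hf : (PySem.Dict.mk r).get? "fontname" with
  | none => cases hc : (PySem.Dict.mk r).get? "char" <;> rfl
  | some font =>
  cases hc : (PySem.Dict.mk r).get? "char" with
  | none => rfl
  | some ch =>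
  simp only [PySem.Dict.modify, pvMapC_insert, pvMapC_contains]
  by_cases h : g.contains font
  · -- font already present: both sides bump the existing counter
    obtain ⟨cs, hcs⟩ : ∃ cs, g.get? font = some cs := by
      rw [PySem.Dict.contains_eq_isSome_get?] at h
      cases hg : g.get? font
      · simp [hg] at h
      · exact ⟨_, rfl⟩
    have hD : (pvMapC g).getD font (PySem.Dict.mk []) = PySem.Dict.counter cs := by
      rw [PySem.Dict.getD_eq_get?_getD, pvMapC_get?, hcs]; rfl
    have hcsD : g.getD font [] = cs := by rw [PySem.Dict.getD_eq_get?_getD, hcs]; rfl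
    simp only [h, if_true, hD, hcsD]
    rw [PySem.Dict.counter_append_singleton]
    rfl
  · -- new font: A inserts an empty dict then overwrites it; B starts the list at [ch]
    have hD : g.getD font [] = [] := PySem.Dict.getD_of_not_contains g [] (by simpa using h)
    simp only [h, if_false, Bool.false_eq_true]
    rw [pvInsert_insert_self, PySem.Dict.getD_insert_self, hD]
    rfl

lemma pvFold_comm (records : List (List (String × String))) (g : PySem.Dict String (List String)) :
    records.foldl pvStepA (pvMapC g) = pvMapC (records.foldl pvStepB g) := by
  induction records generalizing g with
  | nil => rfl
  | cons r t ih => simp only [List.foldl_cons, pvStep_comm, ih]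

-- ===== VERDICT (by name: the statement is the Claim_ definition above) =====
theorem summarize_font_characters_spec : Claim_equal_summarize_font_characters := by
  intro records _ _
  unfold Spec_summarize_font_characters summarize_font_characters summarize_font_characters_alt
  have h0 : (PySem.Dict.mk ([] : List (String × PySem.Dict String Int))) = pvMapC (PySem.Dict.mk []) := rfl
  rw [h0, pvFold_comm]
  simp only [pvMapC, List.map_map]
  apply List.map_congr_left
  intro p _
  simp [PySem.Dict.items_counter, PySem.List.dedup]
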